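-- pv_equiv track=rewrite | github.com/googolmogol/schedulePybot | data_processing.py | status_user
-- ===== SOURCE A (Python) =====
-- def status_user(user_step, value):
--     keys = list(user_step.keys())
--     first_elements = keys.index(value) + 1
--     keys = keys[:first_elements]
--     for i in keys:
--         if user_step[i] == '':
--             return False
--     return True
-- ===== SOURCE B (Python) =====
-- def status_user(user_step, value):
--     for k, v in user_step.items():
--         if v == '':
--             return False
--         if k == value:
--             return True
--     raise ValueError(f"'{value}' is not in list")
-- ===== Notes on version B (the rewrite author's own statement) =====
-- stated objective: simpler
-- what changed: Replaced A's two-phase locate-then-scan (keys(), list.index, slice of the key prefix, then a lookup loop) with a single early-exit pass over the items that stops at the first empty value or at the target key; Pre_ excludes inputs where value is not a key (both A and B raise ValueError) and, on the Lean side only, association lists with duplicate keys, which do not represent a Python dict.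
import Mathlib
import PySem

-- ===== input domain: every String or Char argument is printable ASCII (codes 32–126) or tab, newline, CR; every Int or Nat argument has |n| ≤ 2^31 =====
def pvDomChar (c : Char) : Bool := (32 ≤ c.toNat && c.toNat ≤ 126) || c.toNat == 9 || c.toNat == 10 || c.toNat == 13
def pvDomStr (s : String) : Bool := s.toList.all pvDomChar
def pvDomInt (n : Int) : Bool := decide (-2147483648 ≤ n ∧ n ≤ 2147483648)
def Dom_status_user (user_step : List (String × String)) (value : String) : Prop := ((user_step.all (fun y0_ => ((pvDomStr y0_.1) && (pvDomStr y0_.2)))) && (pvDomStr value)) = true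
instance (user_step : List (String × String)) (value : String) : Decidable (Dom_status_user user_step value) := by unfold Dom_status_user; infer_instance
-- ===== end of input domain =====

-- B fuses A's locate-then-scan (keys/index/slice + lookup loop) into one early-exit pass; simpler, same cost.
-- ===== PORT A =====
-- for-loop of A: scan the key prefix, looking each key up in the dict
def statusLoopA (us : List (String × String)) : List String → Bool
  | [] => true
  | k :: rest =>
    if (((PySem.Dict.mk us).get? k).getD "") == "" then false else statusLoopA us rest

def status_user (user_step : List (String × String)) (value : String) : Bool :=
  let keys := user_step.map Prod.fst
  match PySem.List.index? keys value with
  | none => false      -- Python raises ValueError here; excluded by Pre_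
  | some idx =>
    let first_elements : Int := (idx : Int) + 1
    let keys2 := PySem.List.slice keys none (some first_elements)
    statusLoopA user_step keys2

-- ===== PORT B =====
def status_user_alt (user_step : List (String × String)) (value : String) : Bool :=
  match user_step with
  | [] => false        -- Source B raises ValueError here; excluded by Pre_
  | (k, v) :: rest =>
    if v == "" then false
    else if k == value then true
    else status_user_alt rest value

-- ===== PRECONDITION & SPEC =====
-- Pre_ excludes (1) inputs where value is not a key: both A and B raise ValueError there; and
-- (2) association lists with duplicate keys, which do not represent a Python dict (the collapse
-- into a dict makes the value accidental): see the cite in claim.json.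
def Pre_status_user (user_step : List (String × String)) (value : String) : Prop :=
  (user_step.map Prod.fst).Nodup ∧ value ∈ user_step.map Prod.fst
instance (user_step : List (String × String)) (value : String) : Decidable (Pre_status_user user_step value) := by unfold Pre_status_user; infer_instance

def pvWitness_status_user : (List (String × String)) × String := ([("a", "1"), ("b", "2")], "b")

def Spec_status_user (user_step : List (String × String)) (value : String) (out : Bool) : Prop := out = status_user_alt user_step value
instance (user_step : List (String × String)) (value : String) (out : Bool) : Decidable (Spec_status_user user_step value out) := by unfold Spec_status_user; infer_instance

-- ===== CLAIM (what is proved, stated in full; the proofs are below) =====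
def Claim_equal_status_user : Prop := ∀ (user_step : List (String × String)) (value : String), Dom_status_user user_step value → Pre_status_user user_step value → Spec_status_user user_step value (status_user user_step value)

-- ===== LEMMAS AND PROOFS =====

-- A's lookup loop ignores a leading dict entry whose key occurs in none of the scanned keys
theorem statusLoopA_drop (k v : String) (rest : List (String × String)) (ks : List String)
    (hk : k ∉ ks) : statusLoopA ((k, v) :: rest) ks = statusLoopA rest ks := by
  induction ks with
  | nil => rfl
  | cons x xs ih =>
    have hne : ¬ k = x := fun h => hk (h ▸ List.mem_cons_self)
    simp only [statusLoopA, PySem.Dict.get?_mk_cons, beq_iff_eq, hne, if_false]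
    rw [ih (fun h => hk (List.mem_cons_of_mem _ h))]

theorem status_user_eq (us : List (String × String)) (value : String)
    (h : Pre_status_user us value) : status_user us value = status_user_alt us value := by
  induction us with
  | nil => exact absurd h.2 (by simp)
  | cons p rest ih =>
    obtain ⟨k, v⟩ := p
    obtain ⟨hnd, hmem⟩ := h
    simp only [List.map_cons, List.nodup_cons] at hnd hmem
    by_cases hk : k = value
    · subst hk
      simp only [status_user, status_user_alt, List.map_cons,
        PySem.List.index?_cons_self]
      rw [show ((0 : Nat) : Int) + 1 = ((1 : Nat) : Int) by norm_num,
        PySem.List.slice_to_natCast]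
      simp [statusLoopA, PySem.Dict.get?_mk_cons]
    · have hmem' : value ∈ rest.map Prod.fst := by
        rcases List.mem_cons.mp hmem with h1 | h1
        · exact absurd h1.symm hk
        · exact h1
      obtain ⟨j, hj⟩ := Option.isSome_iff_exists.mp
        ((PySem.List.index?_isSome_iff _ _).mpr hmem')
      simp only [status_user, status_user_alt, List.map_cons,
        PySem.List.index?_cons_of_ne _ hk, hj, Option.map_some]
      rw [show ((j + 1 : Nat) : Int) + 1 = ((j + 2 : Nat) : Int) by push_cast; ring,
        PySem.List.slice_to_natCast]
      simp only [List.take_succ_cons, statusLoopA, PySem.Dict.get?_mk_cons,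
        BEq.rfl, if_true, Option.getD_some]
      by_cases hv : v = ""
      · simp [hv]
      · have hkv : (k == value) = false := by simp [hk]
        rw [statusLoopA_drop k v rest _ (fun h => hnd.1 (List.take_subset _ _ h))]
        have hrec : statusLoopA rest (List.take (j + 1) (List.map Prod.fst rest))
            = status_user rest value := by
          simp only [status_user, hj]
          rw [show ((j : Nat) : Int) + 1 = ((j + 1 : Nat) : Int) by push_cast; ring,
            PySem.List.slice_to_natCast]
        rw [hrec, ih ⟨hnd.2, hmem'⟩, hkv]
        simp

-- ===== VERDICT (by name: the statement is the Claim_ definition above) =====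
theorem status_user_spec : Claim_equal_status_user := by
  intro us value _ hpre
  exact status_user_eq us value hpre
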